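-- pv_equiv track=rewrite | github.com/taohansens/Infnet | Bloco I/Fundamentos do Desenvolvimento Python/Assessment/Q06.py | retorna_listas
-- ===== SOURCE A (Python) =====
-- def retorna_listas(tupla):
--     # vetores vazios
--     num_impares = []
--     num_pos_pares = []
--
--     for pos in range(len(tupla)):
--         # Verifica se o número é ímpar
--         if tupla[pos] % 2 != 0:
--             num_impares.append(tupla[pos])
--         # Verifica se o número está em uma posição par.
--         if pos % 2 == 0:
--             num_pos_pares.append(tupla[pos])
--
--     # Converte para tupla
--     tuple_pos_pares = tuple(num_pos_pares)
--     return num_impares, tuple_pos_pares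
-- ===== SOURCE B (Python) =====
-- def retorna_listas(tupla):
--     # Two independent passes: a value filter for the odds, a stride-2 slice
--     # for the even positions (instead of one fused index loop).
--     num_impares = [x for x in tupla if x % 2 != 0]
--     return num_impares, tuple(tupla[::2])
-- ===== Notes on version B (the rewrite author's own statement) =====
-- stated objective: idiomatic
-- what changed: Replaces the single fused index loop with two independent traversals: a value-filter comprehension for the odd numbers and a stride-2 slice tupla[::2] for the even positions, removing all index arithmetic.
import Mathlib
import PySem

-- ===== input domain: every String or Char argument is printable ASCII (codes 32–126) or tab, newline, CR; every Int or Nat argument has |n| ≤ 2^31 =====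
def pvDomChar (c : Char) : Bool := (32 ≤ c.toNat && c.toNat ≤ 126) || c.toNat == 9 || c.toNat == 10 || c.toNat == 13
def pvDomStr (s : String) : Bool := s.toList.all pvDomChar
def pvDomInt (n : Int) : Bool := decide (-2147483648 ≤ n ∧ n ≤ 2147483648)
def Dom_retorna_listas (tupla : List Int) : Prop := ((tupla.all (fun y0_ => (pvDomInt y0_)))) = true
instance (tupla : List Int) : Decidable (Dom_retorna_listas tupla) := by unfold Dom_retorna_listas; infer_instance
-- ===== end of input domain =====

-- B replaces A's single fused index loop by two independent traversals:
-- a value filter for the odds and a stride-2 slice for the even positions.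

-- ===== PORT A =====
-- one pass over range(len(tupla)) accumulating both lists
def retorna_listas (tupla : List Int) : List Int × List Int :=
  (PySem.List.pyRange 0 (tupla.length) 1).foldl
    (fun (acc : List Int × List Int) pos =>
      let acc1 := if PySem.Int.mod (PySem.List.pyGetD tupla pos 0) 2 ≠ 0
                  then acc.1 ++ [PySem.List.pyGetD tupla pos 0] else acc.1
      let acc2 := if PySem.Int.mod pos 2 = 0
                  then acc.2 ++ [PySem.List.pyGetD tupla pos 0] else acc.2
      (acc1, acc2)) ([], [])

-- ===== PORT B =====
-- filter comprehension + slice tupla[::2]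
def retorna_listas_alt (tupla : List Int) : List Int × List Int :=
  (tupla.filter (fun x => PySem.Int.mod x 2 ≠ 0),
   (PySem.List.slice? tupla none none 2).getD [])

-- ===== PRECONDITION & SPEC =====
def Spec_retorna_listas (tupla : List Int) (out : List Int × List Int) : Prop := out = retorna_listas_alt tupla
instance (tupla : List Int) (out : List Int × List Int) : Decidable (Spec_retorna_listas tupla out) := by unfold Spec_retorna_listas; infer_instance

-- ===== CLAIM (what is proved, stated in full; the proofs are below) =====
def Claim_equal_retorna_listas : Prop := ∀ (tupla : List Int), Dom_retorna_listas tupla → Spec_retorna_listas tupla (retorna_listas tupla)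

-- ===== LEMMAS AND PROOFS =====

-- reference "every second element", structural
def pvEvens : List Int → List Int
  | [] => []
  | [a] => [a]
  | a :: _ :: t => a :: pvEvens t

theorem pvEvens_filterMap : ∀ (xs : List Int),
    (List.range ((xs.length + 1) / 2)).filterMap (fun k => xs[2 * k]?) = pvEvens xs
  | [] => by simp [pvEvens]
  | [a] => by simp [pvEvens]
  | a :: b :: t => by
    have hlen : ((a :: b :: t).length + 1) / 2 = (t.length + 1) / 2 + 1 := by
      simp only [List.length_cons]; omega
    rw [hlen, List.range_succ_eq_map, List.filterMap_cons, List.filterMap_map]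
    have hk : ∀ k, ((a :: b :: t)[2 * Nat.succ k]? = t[2 * k]?) := by
      intro k
      have h2 : 2 * Nat.succ k = (2 * k) + 1 + 1 := by omega
      simp [h2]
    simp only [Function.comp_def, hk, Nat.mul_zero, List.getElem?_cons_zero]
    rw [pvEvens_filterMap t]
    simp [pvEvens]

theorem slice2_eq_pvEvens (xs : List Int) :
    (PySem.List.slice? xs none none 2).getD [] = pvEvens xs := by
  rw [← pvEvens_filterMap xs]
  simp only [PySem.List.slice?, PySem.List.sliceIndices]
  norm_num
  have hc : (if 0 < xs.length then (((xs.length : Int) + 2 - 1) / 2).toNat else 0)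
      = (xs.length + 1) / 2 := by
    split_ifs <;> omega
  rw [hc]
  congr 1


theorem pvEvens_append_singleton : ∀ (xs : List Int) (x : Int),
    pvEvens (xs ++ [x]) =
      if xs.length % 2 = 0 then pvEvens xs ++ [x] else pvEvens xs
  | [], x => by simp [pvEvens]
  | [a], x => by simp [pvEvens]
  | a :: b :: t, x => by
    simp only [List.cons_append, pvEvens, List.length_cons]
    rw [pvEvens_append_singleton t x]
    have h : (t.length + 1 + 1) % 2 = t.length % 2 := by omega
    rw [h]
    split_ifs <;> simp

theorem retorna_listas_eq : ∀ (tupla : List Int),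
    retorna_listas tupla =
      (tupla.filter (fun x => PySem.Int.mod x 2 ≠ 0), pvEvens tupla) := by
  intro tupla
  induction tupla using List.reverseRecOn with
  | nil => simp [retorna_listas, pvEvens]
  | append_singleton xs x ih =>
    unfold retorna_listas at ih ⊢
    have hlen : ((xs ++ [x]).length : Int) = (xs.length : Int) + 1 := by
      simp
    rw [hlen, PySem.List.pyRange_one_succ_right (by positivity), List.foldl_append]
    have hcongr :
        (PySem.List.pyRange 0 (xs.length) 1).foldl
          (fun (acc : List Int × List Int) pos =>
            let acc1 := if PySem.Int.mod (PySem.List.pyGetD (xs ++ [x]) pos 0) 2 ≠ 0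
                        then acc.1 ++ [PySem.List.pyGetD (xs ++ [x]) pos 0] else acc.1
            let acc2 := if PySem.Int.mod pos 2 = 0
                        then acc.2 ++ [PySem.List.pyGetD (xs ++ [x]) pos 0] else acc.2
            (acc1, acc2)) ([], []) =
        (PySem.List.pyRange 0 (xs.length) 1).foldl
          (fun (acc : List Int × List Int) pos =>
            let acc1 := if PySem.Int.mod (PySem.List.pyGetD xs pos 0) 2 ≠ 0
                        then acc.1 ++ [PySem.List.pyGetD xs pos 0] else acc.1
            let acc2 := if PySem.Int.mod pos 2 = 0
                        then acc.2 ++ [PySem.List.pyGetD xs pos 0] else acc.2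
            (acc1, acc2)) ([], []) := by
      apply PySem.List.foldl_congr_mem
      intro acc pos hpos
      have hp := (PySem.List.mem_pyRange_one).1 hpos
      have hget : PySem.List.pyGetD (xs ++ [x]) pos 0 = PySem.List.pyGetD xs pos 0 := by
        rw [PySem.List.pyGetD_eq_getElem (xs ++ [x]) 0 (by omega) (by simp; omega),
            PySem.List.pyGetD_eq_getElem xs 0 (by omega) (by exact_mod_cast hp.2)]
        rw [List.getElem_append_left (by omega)]
      rw [hget]
    rw [hcongr, ih]
    have hgetx : PySem.List.pyGetD (xs ++ [x]) (xs.length : Int) 0 = x := by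
      rw [PySem.List.pyGetD_eq_getElem (xs ++ [x]) 0 (by positivity) (by simp)]
      simp
    have hmod : PySem.Int.mod ((xs.length : Int)) 2 = ((xs.length % 2 : Nat) : Int) := by
      exact_mod_cast PySem.Int.mod_natCast xs.length 2
    simp only [List.foldl_cons, List.foldl_nil, hgetx, hmod, pvEvens_append_singleton,
      List.filter_append]
    by_cases h1 : x % 2 = 1 <;> by_cases h2 : xs.length % 2 = 0 <;>
      simp [h1, h2, List.filter] <;> omega

-- ===== VERDICT (by name: the statement is the Claim_ definition above) =====
theorem retorna_listas_spec : Claim_equal_retorna_listas := by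
  intro tupla _
  unfold Spec_retorna_listas retorna_listas_alt
  rw [retorna_listas_eq, slice2_eq_pvEvens]
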